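-- pv_equiv track=rewrite | github.com/Zach4fbr/CodeExamChallenge | PyDéfis2/Sous-suite croissante.py | plus_grande_sequence_position_k
-- ===== SOURCE A (Python) =====
-- def plus_grande_sequence_position_k(E, k=None):
--     if k is None:
--         k = len(E)-1
--     if k == 0:
--         return [[0]]
--     else :
--         S = plus_grande_sequence_position_k(E, k-1)
--
--         best = []
--         for j,s in enumerate(S):
--             if len(s) > len(best) and E[k] >= E [s[-1]]:
--                 best = s
--         best = best + [k]
--         S.append(best)
--         return S
-- ===== SOURCE B (Python) =====
-- def plus_grande_sequence_position_k(E, k=None):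
--     kk = len(E) - 1 if k is None else k
--     S = [[0]]
--     for i in range(1, kk + 1):
--         eligible = [s for s in S if E[i] >= E[s[-1]]]
--         best = max(eligible, key=len, default=[])
--         S.append(best + [i])
--     return S
-- ===== Notes on version B (the rewrite author's own statement) =====
-- stated objective: simpler
-- what changed: Replaces A's linear recursion (one stack frame per index) and its running conditional-update inner loop by a single iterative loop that selects each predecessor with filter + max(key=len), which has the same earliest-longest tie-break.
import Mathlib
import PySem

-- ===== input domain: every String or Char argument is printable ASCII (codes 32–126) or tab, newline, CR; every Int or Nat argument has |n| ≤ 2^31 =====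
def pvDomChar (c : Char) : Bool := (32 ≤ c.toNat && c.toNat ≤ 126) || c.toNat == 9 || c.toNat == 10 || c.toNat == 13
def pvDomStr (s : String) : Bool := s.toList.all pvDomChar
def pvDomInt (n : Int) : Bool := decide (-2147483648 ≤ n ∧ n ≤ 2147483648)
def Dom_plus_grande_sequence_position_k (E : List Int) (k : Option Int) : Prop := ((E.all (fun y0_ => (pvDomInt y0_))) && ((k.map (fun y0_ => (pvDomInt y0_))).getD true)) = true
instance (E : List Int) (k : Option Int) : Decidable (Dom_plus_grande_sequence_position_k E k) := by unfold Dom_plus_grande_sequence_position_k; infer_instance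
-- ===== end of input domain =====

-- B replaces A's linear recursion and running-best inner loop by one iterative
-- loop choosing each predecessor with filter + max(key=len) (same earliest-longest
-- tie-break); objective: simpler.

-- ===== PORT A =====
-- A's recursion decreases k by 1 down to 0; ported as Nat recursion on the level,
-- entered only for kk ≥ 0 (kk < 0 makes Python A recurse forever; excluded by Pre_).
-- E[k] / E[s[-1]] use pyGetD with default 0: exact wherever Python does not raise (inside Pre_).
def pAAux (E : List Int) : Nat → List (List Int)
  | 0 => [[0]]
  | n + 1 =>
    let S := pAAux E n
    let best := S.foldl (fun best s =>
      if s.length > best.length ∧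
          PySem.List.pyGetD E ((n : Int) + 1) 0 ≥
            PySem.List.pyGetD E (PySem.List.pyGetD s (-1) 0) 0
      then s else best) []
    S ++ [best ++ [(n : Int) + 1]]

def plus_grande_sequence_position_k (E : List Int) (k : Option Int) : List (List Int) :=
  let kk : Int := match k with | none => (E.length : Int) - 1 | some v => v
  if kk < 0 then []  -- unreachable under Pre_ (Python A diverges there)
  else pAAux E kk.toNat

-- ===== PORT B =====
def pBBest (E : List Int) (S : List (List Int)) (i : Int) : List Int :=
  let eligible := S.filter (fun s =>
    PySem.List.pyGetD E i 0 ≥ PySem.List.pyGetD E (PySem.List.pyGetD s (-1) 0) 0)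
  (PySem.List.max? eligible (fun s => (s.length : Int))).getD []

def plus_grande_sequence_position_k_alt (E : List Int) (k : Option Int) : List (List Int) :=
  let kk : Int := match k with | none => (E.length : Int) - 1 | some v => v
  (PySem.List.pyRange 1 (kk + 1) 1).foldl
    (fun S i => S ++ [pBBest E S i ++ [i]]) [[0]]

-- ===== PRECONDITION & SPEC =====
-- Pre_ excludes exactly the inputs on which Python A raises: empty E with k=None and
-- negative k (infinite recursion → RecursionError), and k ≥ len(E) with k > 0 (IndexError).
def Pre_plus_grande_sequence_position_k (E : List Int) (k : Option Int) : Prop :=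
  if k.isNone then E ≠ []
  else 0 ≤ k.getD 0 ∧ (k.getD 0 = 0 ∨ k.getD 0 < (E.length : Int))
instance (E : List Int) (k : Option Int) : Decidable (Pre_plus_grande_sequence_position_k E k) := by
  unfold Pre_plus_grande_sequence_position_k; infer_instance

def pvWitness_plus_grande_sequence_position_k : List Int × Option Int := ([3, 1, 2, 2, 5], none)

def Spec_plus_grande_sequence_position_k (E : List Int) (k : Option Int) (out : List (List Int)) : Prop := out = plus_grande_sequence_position_k_alt E k
instance (E : List Int) (k : Option Int) (out : List (List Int)) : Decidable (Spec_plus_grande_sequence_position_k E k out) := by unfold Spec_plus_grande_sequence_position_k; infer_instance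

-- ===== CLAIM (what is proved, stated in full; the proofs are below) =====
def Claim_equal_plus_grande_sequence_position_k : Prop := ∀ (E : List Int) (k : Option Int), Dom_plus_grande_sequence_position_k E k → Pre_plus_grande_sequence_position_k E k → Spec_plus_grande_sequence_position_k E k (plus_grande_sequence_position_k E k)

-- ===== LEMMAS AND PROOFS =====

-- a fold with strict-< replacement (the fold inside PySem.List.max?), started from
-- `some x`, expressed via the same fold started from `none`
theorem pv_fold_some (f : Option (List Int) → List Int → Option (List Int))
    (hnone : ∀ y, f none y = some y)
    (hsome : ∀ m y, f (some m) y = if (m.length : Int) < (y.length : Int) then some y else some m) :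
    ∀ (ys : List (List Int)) (x : List Int),
      ys.foldl f (some x)
      = match ys.foldl f none with
        | none => some x
        | some b => if (x.length : Int) < (b.length : Int) then some b else some x := by
  intro ys
  induction ys with
  | nil => intro x; simp
  | cons y ys ih =>
    intro x
    simp only [List.foldl_cons, hnone, hsome]
    rw [show (if (x.length : Int) < (y.length : Int) then (some y : Option (List Int)) else some x)
          = some (if (x.length : Int) < (y.length : Int) then y else x) by split_ifs <;> rfl]
    rw [ih (if (x.length : Int) < (y.length : Int) then y else x), ih y]
    cases h : ys.foldl f none with
    | none =>
        simp only []
        try (split_ifs <;> try simp only [])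
        all_goals try split_ifs
        all_goals (first | rfl | (exfalso; omega) | simp_all | omega)
    | some b =>
        simp only []
        try (split_ifs <;> try simp only [])
        all_goals try split_ifs
        all_goals (first | rfl | (exfalso; omega) | simp_all | omega)

-- max? over a cons, via max? of the tail
theorem pv_max?_cons (x : List Int) (ys : List (List Int)) :
    PySem.List.max? (x :: ys) (fun s => (s.length : Int))
      = match PySem.List.max? ys (fun s => (s.length : Int)) with
        | none => some x
        | some b => if (x.length : Int) < (b.length : Int) then some b else some x := by
  simp only [PySem.List.max?, List.foldl_cons]
  exact pv_fold_some _ (fun y => rfl) (fun m y => rfl) ys x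

-- A's running-best loop equals first-maximum-by-length of the eligible elements
theorem pv_fold_best_eq_max (Q : List Int → Prop) [DecidablePred Q] :
    ∀ (S : List (List Int)) (m : List Int),
      S.foldl (fun best s => if s.length > best.length ∧ Q s then s else best) m
      = match PySem.List.max? (S.filter (fun s => decide (Q s))) (fun s => (s.length : Int)) with
        | none => m
        | some b => if m.length < b.length then b else m := by
  intro S
  induction S with
  | nil => intro m; simp [PySem.List.max?]
  | cons s S ih =>
    intro m
    simp only [List.foldl_cons, List.filter_cons]
    rw [ih]
    by_cases hq : Q s
    · simp only [hq, and_true, decide_true, if_true]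
      rw [pv_max?_cons]
      cases h : PySem.List.max? (S.filter (fun s => decide (Q s))) (fun s => (s.length : Int)) with
      | none =>
        simp only []
        try (split_ifs <;> try simp only [])
        all_goals try split_ifs
        all_goals (first | rfl | (exfalso; omega) | simp_all | omega)
      | some b =>
        simp only []
        try (split_ifs <;> try simp only [])
        all_goals try split_ifs
        all_goals (first | rfl | (exfalso; omega) | simp_all | omega)
    · have hd : decide (Q s) = false := by simp [hq]
      simp only [hq, and_false, if_false, decide_false, Bool.false_eq_true]

-- one A-level step equals one B-loop step
theorem pv_step (E : List Int) (n : Nat) :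
    pAAux E (n + 1) = pAAux E n ++ [pBBest E (pAAux E n) ((n : Int) + 1) ++ [(n : Int) + 1]] := by
  show pAAux E n ++ [((pAAux E n).foldl (fun best s =>
      if s.length > best.length ∧
          PySem.List.pyGetD E ((n : Int) + 1) 0 ≥
            PySem.List.pyGetD E (PySem.List.pyGetD s (-1) 0) 0
      then s else best) []) ++ [(n : Int) + 1]] = _
  congr 2
  rw [pv_fold_best_eq_max (fun s =>
        PySem.List.pyGetD E ((n : Int) + 1) 0 ≥
          PySem.List.pyGetD E (PySem.List.pyGetD s (-1) 0) 0)]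
  unfold pBBest
  simp only []
  cases h : PySem.List.max? ((pAAux E n).filter (fun s =>
      decide (PySem.List.pyGetD E ((n : Int) + 1) 0 ≥
        PySem.List.pyGetD E (PySem.List.pyGetD s (-1) 0) 0))) (fun s => (s.length : Int)) with
  | none => simp [h]
  | some b => simp [h]

-- the Nat-level recursion equals the pyRange fold
theorem pv_aux_eq (E : List Int) :
    ∀ n : Nat, pAAux E n
      = (PySem.List.pyRange 1 ((n : Int) + 1) 1).foldl
          (fun S i => S ++ [pBBest E S i ++ [i]]) [[0]] := by
  intro n
  induction n with
  | zero => simp [pAAux, PySem.List.pyRange_one_eq_nil]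
  | succ n ih =>
    have hr : PySem.List.pyRange 1 ((((n : Nat) + 1 : Nat) : Int) + 1) 1
        = PySem.List.pyRange 1 ((n : Int) + 1) 1 ++ [(n : Int) + 1] := by
      push_cast
      rw [show ((n : Int) + 1) + 1 = ((n : Int) + 1) + 1 from rfl,
          PySem.List.pyRange_one_succ_right (by omega)]
    rw [pv_step E n, ih, hr, List.foldl_append]
    simp

-- ===== VERDICT (by name: the statement is the Claim_ definition above) =====
theorem plus_grande_sequence_position_k_spec : Claim_equal_plus_grande_sequence_position_k := by
  intro E k _ hpre
  unfold Spec_plus_grande_sequence_position_k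
  unfold plus_grande_sequence_position_k plus_grande_sequence_position_k_alt
  cases k with
  | none =>
    simp [Pre_plus_grande_sequence_position_k] at hpre
    have hlen : 0 < E.length := List.length_pos_iff.mpr hpre
    have hk : ¬ ((E.length : Int) - 1 < 0) := by omega
    simp only [hk, if_false]
    rw [pv_aux_eq E ((E.length : Int) - 1).toNat]
    congr 2
    omega
  | some v =>
    simp [Pre_plus_grande_sequence_position_k] at hpre
    have hk : ¬ (v < 0) := by omega
    simp only [hk, if_false]
    rw [pv_aux_eq E v.toNat]
    congr 2
    omega
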